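-- pv_equiv track=rewrite | github.com/nmdp-bioinformatics/py-grimm | grma/GRMA/Utilities/utils.py | list_to_genotype
-- ===== SOURCE A (Python) =====
-- from collections.abc import Sequence
--
-- def list_to_genotype(geno_list: Sequence[int]) -> str:
--     """convert genotype from list[int] to str according to gl-string format"""
--     allele_dict = {
--         0: "A*", 1: "A*",
--         2: "B*", 3: "B*",
--         4: "C*", 5: "C*",
--         6: "DQB1*", 7: "DQB1*",
--         8: "DRB1*", 9: "DRB1*"
--     }
--     geno: str = ""
--     for i in range(10):
--         allele_num = str(geno_list[i])
--         geno += f"{allele_dict[i]}"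
--         geno += f"{allele_num[:-2]}:{allele_num[-2:]}".zfill(5)
--         geno += "+" if i % 2 == 0 else "^"
--     return geno[:-1]
-- ===== SOURCE B (Python) =====
-- def list_to_genotype(geno_list):
--     """convert genotype from list[int] to str according to gl-string format"""
--     def fmt(n):
--         s = str(n)
--         return f"{s[:-2]}:{s[-2:]}".zfill(5)
--     prefixes = ["A*", "B*", "C*", "DQB1*", "DRB1*"]
--     loci = ["+".join(p + fmt(geno_list[2 * j + k]) for k in (0, 1))
--             for j, p in enumerate(prefixes)]
--     return "^".join(loci)
-- ===== Notes on version B (the rewrite author's own statement) =====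
-- stated objective: idiomatic
-- what changed: Replaces A's flat 10-iteration accumulator loop with its index-keyed prefix dict, parity test for the separator and trailing-character strip by a per-locus decomposition: five prefix-labelled locus strings, each '+'-joining its two formatted alleles, joined with '^'.
import Mathlib
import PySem

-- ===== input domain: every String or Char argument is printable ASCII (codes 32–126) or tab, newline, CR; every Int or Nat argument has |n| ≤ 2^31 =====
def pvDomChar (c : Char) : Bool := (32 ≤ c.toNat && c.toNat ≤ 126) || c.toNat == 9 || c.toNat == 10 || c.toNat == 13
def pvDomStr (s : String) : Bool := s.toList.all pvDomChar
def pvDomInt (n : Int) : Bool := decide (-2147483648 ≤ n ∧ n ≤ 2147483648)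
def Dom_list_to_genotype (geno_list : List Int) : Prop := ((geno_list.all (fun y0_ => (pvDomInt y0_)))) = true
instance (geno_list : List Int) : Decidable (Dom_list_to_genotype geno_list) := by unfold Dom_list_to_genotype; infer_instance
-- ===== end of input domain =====

-- B replaces A's flat 10-step accumulator loop (dict lookup, parity test, trailing-char strip) by a
-- per-locus decomposition: five prefix-labelled locus strings, each "+"-joining its two formatted
-- alleles, joined with "^".  Objective: idiomatic; same cost.

-- ===== PORT A =====
def list_to_genotype (geno_list : List Int) : String :=
  let allele_dict : PySem.Dict Int (List Char) :=
    PySem.Dict.ofList [(0, ['A','*']), (1, ['A','*']), (2, ['B','*']), (3, ['B','*']),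
      (4, ['C','*']), (5, ['C','*']), (6, ['D','Q','B','1','*']), (7, ['D','Q','B','1','*']),
      (8, ['D','R','B','1','*']), (9, ['D','R','B','1','*'])]
  let geno : List Char :=
    (PySem.List.pyRange 0 10 1).foldl (fun geno i =>
      -- geno_list[i]: in range for every i under Pre_, so pyGetD's default is never used
      let allele_num := PySem.Int.toChars (PySem.List.pyGetD geno_list i 0)
      let geno := geno ++ allele_dict.getD i []
      let geno := geno ++ PySem.Chars.zfill
        (PySem.Chars.slice allele_num none (some (-2)) ++ [':'] ++
         PySem.Chars.slice allele_num (some (-2)) none) 5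
      geno ++ (if PySem.Int.mod i 2 == 0 then ['+'] else ['^'])) []
  String.ofList (PySem.Chars.slice geno none (some (-1)))

-- ===== PORT B =====
def pvFmt (n : Int) : List Char :=
  let s := PySem.Int.toChars n
  PySem.Chars.zfill (PySem.Chars.slice s none (some (-2)) ++ [':'] ++
    PySem.Chars.slice s (some (-2)) none) 5

def list_to_genotype_alt (geno_list : List Int) : String :=
  let prefixes : List (List Char) :=
    [['A','*'], ['B','*'], ['C','*'], ['D','Q','B','1','*'], ['D','R','B','1','*']]
  let loci := (PySem.List.enumerate prefixes 0).map (fun jp =>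
    PySem.Chars.join ['+'] (([0, 1] : List Int).map (fun k =>
      jp.2 ++ pvFmt (PySem.List.pyGetD geno_list (2 * jp.1 + k) 0))))
  String.ofList (PySem.Chars.join ['^'] loci)

-- ===== PRECONDITION & SPEC =====
-- Pre_ excludes lists with fewer than 10 elements, on which A raises IndexError.
def Pre_list_to_genotype (geno_list : List Int) : Prop := 10 ≤ geno_list.length
instance (geno_list : List Int) : Decidable (Pre_list_to_genotype geno_list) := by unfold Pre_list_to_genotype; infer_instance
def pvWitness_list_to_genotype : List Int := [101, 102, 201, 202, 301, 302, 401, 402, 501, 502]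

def Spec_list_to_genotype (geno_list : List Int) (out : String) : Prop := out = list_to_genotype_alt geno_list
instance (geno_list : List Int) (out : String) : Decidable (Spec_list_to_genotype geno_list out) := by unfold Spec_list_to_genotype; infer_instance

-- ===== CLAIM (what is proved, stated in full; the proofs are below) =====
def Claim_equal_list_to_genotype : Prop := ∀ (geno_list : List Int), Dom_list_to_genotype geno_list → Pre_list_to_genotype geno_list → Spec_list_to_genotype geno_list (list_to_genotype geno_list)

-- ===== LEMMAS AND PROOFS =====

-- A's 10-step fold, on a list of length ≥ 10, evaluates to the canonical GL-string concatenation.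
lemma pvA_eval (a0 a1 a2 a3 a4 a5 a6 a7 a8 a9 : Int) (rest : List Int) :
    list_to_genotype (a0::a1::a2::a3::a4::a5::a6::a7::a8::a9::rest) = String.ofList
      (['A','*'] ++ pvFmt a0 ++ ['+'] ++ ['A','*'] ++ pvFmt a1 ++ ['^']
       ++ ['B','*'] ++ pvFmt a2 ++ ['+'] ++ ['B','*'] ++ pvFmt a3 ++ ['^']
       ++ ['C','*'] ++ pvFmt a4 ++ ['+'] ++ ['C','*'] ++ pvFmt a5 ++ ['^']
       ++ ['D','Q','B','1','*'] ++ pvFmt a6 ++ ['+'] ++ ['D','Q','B','1','*'] ++ pvFmt a7 ++ ['^']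
       ++ ['D','R','B','1','*'] ++ pvFmt a8 ++ ['+'] ++ ['D','R','B','1','*'] ++ pvFmt a9) := by
  have hr : PySem.List.pyRange 0 10 1 = [0,1,2,3,4,5,6,7,8,9] := by decide
  have hd0 : (PySem.Dict.ofList [((0:Int), ['A','*']), (1, ['A','*']), (2, ['B','*']), (3, ['B','*']), (4, ['C','*']), (5, ['C','*']), (6, ['D','Q','B','1','*']), (7, ['D','Q','B','1','*']), (8, ['D','R','B','1','*']), (9, ['D','R','B','1','*'])]).getD 0 [] = ['A','*'] := by decide
  have hd1 : (PySem.Dict.ofList [((0:Int), ['A','*']), (1, ['A','*']), (2, ['B','*']), (3, ['B','*']), (4, ['C','*']), (5, ['C','*']), (6, ['D','Q','B','1','*']), (7, ['D','Q','B','1','*']), (8, ['D','R','B','1','*']), (9, ['D','R','B','1','*'])]).getD 1 [] = ['A','*'] := by decide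
  have hd2 : (PySem.Dict.ofList [((0:Int), ['A','*']), (1, ['A','*']), (2, ['B','*']), (3, ['B','*']), (4, ['C','*']), (5, ['C','*']), (6, ['D','Q','B','1','*']), (7, ['D','Q','B','1','*']), (8, ['D','R','B','1','*']), (9, ['D','R','B','1','*'])]).getD 2 [] = ['B','*'] := by decide
  have hd3 : (PySem.Dict.ofList [((0:Int), ['A','*']), (1, ['A','*']), (2, ['B','*']), (3, ['B','*']), (4, ['C','*']), (5, ['C','*']), (6, ['D','Q','B','1','*']), (7, ['D','Q','B','1','*']), (8, ['D','R','B','1','*']), (9, ['D','R','B','1','*'])]).getD 3 [] = ['B','*'] := by decide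
  have hd4 : (PySem.Dict.ofList [((0:Int), ['A','*']), (1, ['A','*']), (2, ['B','*']), (3, ['B','*']), (4, ['C','*']), (5, ['C','*']), (6, ['D','Q','B','1','*']), (7, ['D','Q','B','1','*']), (8, ['D','R','B','1','*']), (9, ['D','R','B','1','*'])]).getD 4 [] = ['C','*'] := by decide
  have hd5 : (PySem.Dict.ofList [((0:Int), ['A','*']), (1, ['A','*']), (2, ['B','*']), (3, ['B','*']), (4, ['C','*']), (5, ['C','*']), (6, ['D','Q','B','1','*']), (7, ['D','Q','B','1','*']), (8, ['D','R','B','1','*']), (9, ['D','R','B','1','*'])]).getD 5 [] = ['C','*'] := by decide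
  have hd6 : (PySem.Dict.ofList [((0:Int), ['A','*']), (1, ['A','*']), (2, ['B','*']), (3, ['B','*']), (4, ['C','*']), (5, ['C','*']), (6, ['D','Q','B','1','*']), (7, ['D','Q','B','1','*']), (8, ['D','R','B','1','*']), (9, ['D','R','B','1','*'])]).getD 6 [] = ['D','Q','B','1','*'] := by decide
  have hd7 : (PySem.Dict.ofList [((0:Int), ['A','*']), (1, ['A','*']), (2, ['B','*']), (3, ['B','*']), (4, ['C','*']), (5, ['C','*']), (6, ['D','Q','B','1','*']), (7, ['D','Q','B','1','*']), (8, ['D','R','B','1','*']), (9, ['D','R','B','1','*'])]).getD 7 [] = ['D','Q','B','1','*'] := by decide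
  have hd8 : (PySem.Dict.ofList [((0:Int), ['A','*']), (1, ['A','*']), (2, ['B','*']), (3, ['B','*']), (4, ['C','*']), (5, ['C','*']), (6, ['D','Q','B','1','*']), (7, ['D','Q','B','1','*']), (8, ['D','R','B','1','*']), (9, ['D','R','B','1','*'])]).getD 8 [] = ['D','R','B','1','*'] := by decide
  have hd9 : (PySem.Dict.ofList [((0:Int), ['A','*']), (1, ['A','*']), (2, ['B','*']), (3, ['B','*']), (4, ['C','*']), (5, ['C','*']), (6, ['D','Q','B','1','*']), (7, ['D','Q','B','1','*']), (8, ['D','R','B','1','*']), (9, ['D','R','B','1','*'])]).getD 9 [] = ['D','R','B','1','*'] := by decide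
  have hm0 : (if PySem.Int.mod (0:Int) 2 == 0 then (['+']:List Char) else ['^']) = ['+'] := by decide
  have hm1 : (if PySem.Int.mod (1:Int) 2 == 0 then (['+']:List Char) else ['^']) = ['^'] := by decide
  have hm2 : (if PySem.Int.mod (2:Int) 2 == 0 then (['+']:List Char) else ['^']) = ['+'] := by decide
  have hm3 : (if PySem.Int.mod (3:Int) 2 == 0 then (['+']:List Char) else ['^']) = ['^'] := by decide
  have hm4 : (if PySem.Int.mod (4:Int) 2 == 0 then (['+']:List Char) else ['^']) = ['+'] := by decide
  have hm5 : (if PySem.Int.mod (5:Int) 2 == 0 then (['+']:List Char) else ['^']) = ['^'] := by decide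
  have hm6 : (if PySem.Int.mod (6:Int) 2 == 0 then (['+']:List Char) else ['^']) = ['+'] := by decide
  have hm7 : (if PySem.Int.mod (7:Int) 2 == 0 then (['+']:List Char) else ['^']) = ['^'] := by decide
  have hm8 : (if PySem.Int.mod (8:Int) 2 == 0 then (['+']:List Char) else ['^']) = ['+'] := by decide
  have hm9 : (if PySem.Int.mod (9:Int) 2 == 0 then (['+']:List Char) else ['^']) = ['^'] := by decide
  unfold list_to_genotype
  simp only [hr, List.foldl]
  simp only [hd0, hd1, hd2, hd3, hd4, hd5, hd6, hd7, hd8, hd9, hm0, hm1, hm2, hm3, hm4, hm5, hm6, hm7, hm8, hm9]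
  simp only [PySem.List.pyGetD_ofNat', List.getD_eq_getElem?_getD, List.length_cons,
    lt_add_iff_pos_left, Order.lt_add_one_iff, zero_le, getElem?_pos, List.getElem_cons_succ,
    List.getElem_cons_zero, Option.getD_some, PySem.Chars.slice_eq_listSlice]
  rw [PySem.List.slice_to_neg_one]
  simp [pvFmt, List.dropLast_append_of_ne_nil, List.dropLast_cons_of_ne_nil]

-- B's per-locus map-and-join evaluates to the same canonical concatenation.
lemma pvB_eval (a0 a1 a2 a3 a4 a5 a6 a7 a8 a9 : Int) (rest : List Int) :
    list_to_genotype_alt (a0::a1::a2::a3::a4::a5::a6::a7::a8::a9::rest) = String.ofList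
      (['A','*'] ++ pvFmt a0 ++ ['+'] ++ ['A','*'] ++ pvFmt a1 ++ ['^']
       ++ ['B','*'] ++ pvFmt a2 ++ ['+'] ++ ['B','*'] ++ pvFmt a3 ++ ['^']
       ++ ['C','*'] ++ pvFmt a4 ++ ['+'] ++ ['C','*'] ++ pvFmt a5 ++ ['^']
       ++ ['D','Q','B','1','*'] ++ pvFmt a6 ++ ['+'] ++ ['D','Q','B','1','*'] ++ pvFmt a7 ++ ['^']
       ++ ['D','R','B','1','*'] ++ pvFmt a8 ++ ['+'] ++ ['D','R','B','1','*'] ++ pvFmt a9) := by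
  have he : PySem.List.enumerate
      ([['A','*'], ['B','*'], ['C','*'], ['D','Q','B','1','*'], ['D','R','B','1','*']] : List (List Char)) 0
      = [(0,['A','*']), (1,['B','*']), (2,['C','*']), (3,['D','Q','B','1','*']), (4,['D','R','B','1','*'])] := by decide
  unfold list_to_genotype_alt
  simp only [he, List.map]
  norm_num
  simp only [PySem.List.pyGetD_ofNat', List.getD_eq_getElem?_getD, List.length_cons,
    lt_add_iff_pos_left, Order.lt_add_one_iff, zero_le, getElem?_pos, List.getElem_cons_succ,
    List.getElem_cons_zero, Option.getD_some]
  simp [PySem.Chars.join, List.intercalate, List.intersperse]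

-- ===== VERDICT (by name: the statement is the Claim_ definition above) =====
theorem list_to_genotype_spec : Claim_equal_list_to_genotype := by
  intro geno_list _ hpre
  unfold Pre_list_to_genotype at hpre
  unfold Spec_list_to_genotype
  rcases geno_list with _ | ⟨a0, _ | ⟨a1, _ | ⟨a2, _ | ⟨a3, _ | ⟨a4, _ | ⟨a5, _ | ⟨a6, _ | ⟨a7, _ | ⟨a8, _ | ⟨a9, rest⟩⟩⟩⟩⟩⟩⟩⟩⟩⟩ <;>
    first
      | rw [pvA_eval, pvB_eval]
      | (exfalso; simp [List.length] at hpre)
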